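-- pv_equiv track=rewrite | github.com/einhalv/ocparse | ocparse.py | unzip_sep
-- ===== SOURCE A (Python) =====
-- def unzip_sep(s: str, seps=(' ', '_', '|')) -> tuple[str, list[str, ...]]:
--     """split into string without separators and a list of separators
--
--        Returns tuple of stripped string and list of separators.
--        There is one separator per character of the stripped string and
--        one at the end. A separator string in the list is '' if
--        there is no separator.
--
--     """
--     sbare = ''
--     sepl = []
--     cs = ''
--     for c in s[::-1]:
--         if c in seps:
--             cs += c
--         else:
--             sbare += c
--             sepl.append(cs[::-1])
--             cs = ''
--     sepl.append(cs)
--     return (sbare[::-1], sepl)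
-- ===== SOURCE B (Python) =====
-- def unzip_sep(s: str, seps=(' ', '_', '|')) -> tuple[str, list]:
--     """Forward scan: consume the leading separator run, then for each bare
--     character capture the separator run that follows it (forward order)."""
--     n = len(s)
--     i = 0
--     lead = []
--     while i < n and s[i] in seps:
--         lead.append(s[i])
--         i += 1
--     bare = []
--     groups = []
--     while i < n:
--         bare.append(s[i])
--         i += 1
--         g = []
--         while i < n and s[i] in seps:
--             g.append(s[i])
--             i += 1
--         groups.append(''.join(g))
--     groups.reverse()
--     groups.append(''.join(lead))
--     return (''.join(bare), groups)
-- ===== Notes on version B (the rewrite author's own statement) =====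
-- stated objective: alternative
-- what changed: Replaces the backward scan over s[::-1] with three per-group reversals by a forward scan that consumes the leading separator run and then, per bare character, the following separator run, reversing only the group list once at the end.
-- intended difference: On strings whose leading separator run is not a palindrome, A returns that leading run reversed in the final sepl slot while B returns it in forward order; forward order is intended since A emits every other separator run in forward order and only omits the reversal for the leftover cs of the leading run. — e.g. on unzip_sep(" _a", [" ", "_"]): A returns ("a", ["", "_ "]), B returns ("a", ["", " _"])
import Mathlib
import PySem

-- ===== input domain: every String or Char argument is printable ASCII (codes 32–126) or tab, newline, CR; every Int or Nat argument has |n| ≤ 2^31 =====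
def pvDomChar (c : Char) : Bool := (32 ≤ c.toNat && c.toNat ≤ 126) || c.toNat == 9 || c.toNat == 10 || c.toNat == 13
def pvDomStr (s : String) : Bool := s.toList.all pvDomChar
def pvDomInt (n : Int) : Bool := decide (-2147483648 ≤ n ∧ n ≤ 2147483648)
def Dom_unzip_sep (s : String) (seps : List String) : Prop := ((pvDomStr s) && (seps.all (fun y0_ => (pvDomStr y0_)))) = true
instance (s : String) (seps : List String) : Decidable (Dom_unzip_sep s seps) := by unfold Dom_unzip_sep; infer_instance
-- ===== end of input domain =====

-- B scans forward instead of A's backward scan; A's accidental reversal of the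
-- leading-separator group is corrected in B (stated as D_ below).

-- ===== PORT A =====
-- backward scan: for c in s[::-1], accumulating (sbare, sepl, cs)
def unzip_sep (s : String) (seps : List String) : String × List String :=
  let st := s.toList.reverse.foldl
    (fun (st : List Char × List String × List Char) c =>
      match st with
      | (sbare, sepl, cs) =>
        if String.ofList [c] ∈ seps then (sbare, sepl, cs ++ [c])
        else (sbare ++ [c], sepl ++ [String.ofList cs.reverse], []))
    ([], [], [])
  (String.ofList st.1.reverse, st.2.1 ++ [String.ofList st.2.2])

-- ===== PORT B =====
-- the forward outer while-loop of Source B, fuel = remaining length makes it total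
-- (the inner separator-run while-loop is takeWhile/dropWhile)
def pvGoB (p : Char → Bool) : Nat → List Char → List Char → List String → List Char × List String
  | _, [], bare, groups => (bare, groups)
  | 0, _ :: _, bare, groups => (bare, groups)   -- never reached: fuel starts at the list length
  | fuel + 1, c :: t, bare, groups =>
      pvGoB p fuel (t.dropWhile p) (bare ++ [c]) (groups ++ [String.ofList (t.takeWhile p)])

def unzip_sep_alt (s : String) (seps : List String) : String × List String :=
  let p := fun c => decide (String.ofList [c] ∈ seps)
  let l := s.toList
  let lead := l.takeWhile p
  let rest := l.dropWhile p
  let r := pvGoB p rest.length rest [] []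
  (String.ofList r.1, r.2.reverse ++ [String.ofList lead])

-- ===== PRECONDITION & SPEC =====
-- On strings whose leading separator run is not a palindrome, A returns that
-- leading run REVERSED in the final sepl slot (an accident of its backward
-- scan — every other run is emitted in forward order); B returns it in forward
-- order, which is the intended value.
-- the leading run of separator characters of s (a shape of the input)
def pvLeadSeps (seps : List String) : List Char → List Char
  | [] => []
  | c :: rest => if seps.any (fun u => u.toList == [c]) then c :: pvLeadSeps seps rest else []

def D_unzip_sep (s : String) (seps : List String) : Prop :=
  pvLeadSeps seps s.toList ≠ (pvLeadSeps seps s.toList).reverse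
instance (s : String) (seps : List String) : Decidable (D_unzip_sep s seps) := by
  unfold D_unzip_sep; infer_instance

def Spec_unzip_sep (s : String) (seps : List String) (out : String × List String) : Prop :=
  ¬ D_unzip_sep s seps → out = unzip_sep_alt s seps
instance (s : String) (seps : List String) (out : String × List String) : Decidable (Spec_unzip_sep s seps out) := by
  unfold Spec_unzip_sep; infer_instance

def pvDiffWitness_unzip_sep : String × List String := (" _a", [" ", "_"])
def pvDiffWitnessOut_unzip_sep : (String × List String) × (String × List String) :=
  (("a", ["", "_ "]), ("a", ["", " _"]))

-- ===== CLAIM (what is proved, stated in full; the proofs are below) =====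
def Claim_unchanged_unzip_sep : Prop := ∀ (s : String) (seps : List String), Dom_unzip_sep s seps → Spec_unzip_sep s seps (unzip_sep s seps)
def Claim_changed_unzip_sep : Prop := Dom_unzip_sep (pvDiffWitness_unzip_sep.1) (pvDiffWitness_unzip_sep.2) ∧ D_unzip_sep (pvDiffWitness_unzip_sep.1) (pvDiffWitness_unzip_sep.2) ∧ unzip_sep (pvDiffWitness_unzip_sep.1) (pvDiffWitness_unzip_sep.2) = pvDiffWitnessOut_unzip_sep.1 ∧ unzip_sep_alt (pvDiffWitness_unzip_sep.1) (pvDiffWitness_unzip_sep.2) = pvDiffWitnessOut_unzip_sep.2 ∧ pvDiffWitnessOut_unzip_sep.1 ≠ pvDiffWitnessOut_unzip_sep.2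
def Claim_exact_unzip_sep : Prop := ∀ (s : String) (seps : List String), Dom_unzip_sep s seps → D_unzip_sep s seps → unzip_sep s seps ≠ unzip_sep_alt s seps

-- ===== LEMMAS AND PROOFS =====

theorem pvLeadSeps_eq (seps : List String) (l : List Char) :
    pvLeadSeps seps l = l.takeWhile (fun c => decide (String.ofList [c] ∈ seps)) := by
  induction l with
  | nil => simp [pvLeadSeps]
  | cons c t ih =>
      have hiff : (seps.any (fun u => u.toList == [c]) = true) ↔ String.ofList [c] ∈ seps := by
        simp only [List.any_eq_true, beq_iff_eq]
        constructor
        · rintro ⟨u, hu, h⟩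
          have : u = String.ofList [c] := by
            have := congrArg String.ofList h
            simpa [String.ofList_toList] using this
          exact this ▸ hu
        · intro h
          exact ⟨_, h, by simp⟩
      by_cases hm : String.ofList [c] ∈ seps
      · have ha : seps.any (fun u => u.toList == [c]) = true := hiff.mpr hm
        simp [pvLeadSeps, ha, hm, ih]
      · have ha : seps.any (fun u => u.toList == [c]) = false :=
          Bool.not_eq_true _ |>.mp (fun h => hm (hiff.mp h))
        simp [pvLeadSeps, ha, hm]

-- accumulator- and fuel-free version of pvGoB, for the proofs
def pvGB (p : Char → Bool) : List Char → List Char × List String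
  | [] => ([], [])
  | c :: t =>
      let r := pvGB p (t.dropWhile p)
      (c :: r.1, String.ofList (t.takeWhile p) :: r.2)
termination_by l => l.length
decreasing_by
  simpa using Nat.lt_succ_of_le (List.length_dropWhile_le p t)

theorem pvGoB_eq (p : Char → Bool) (fuel : Nat) (l bare : List Char) (groups : List String)
    (hf : l.length ≤ fuel) :
    pvGoB p fuel l bare groups = (bare ++ (pvGB p l).1, groups ++ (pvGB p l).2) := by
  induction fuel generalizing l bare groups with
  | zero =>
      cases l with
      | nil => simp [pvGoB, pvGB]
      | cons c t => simp at hf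
  | succ fuel ih =>
      cases l with
      | nil => simp [pvGoB, pvGB]
      | cons c t =>
          have ht : (t.dropWhile p).length ≤ fuel :=
            le_trans (List.length_dropWhile_le p t) (by simpa using hf)
          simp [pvGoB, pvGB, ih _ _ _ ht]

-- bare chars produced by pvGB after stripping the lead = the non-separator chars
theorem pvGB_bare (p : Char → Bool) (l : List Char) :
    (pvGB p (l.dropWhile p)).1 = l.filter (fun c => !p c) := by
  induction l with
  | nil => simp [pvGB]
  | cons c t ih =>
      by_cases h : p c
      · simp [h, ih]
      · simp [h, pvGB, ih]

-- invariant of A's backward scan, phrased as a foldr over the forward list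
theorem pvFoldr_inv (seps : List String) (l : List Char) :
    (l.foldr (fun c (st : List Char × List String × List Char) =>
        match st with
        | (sbare, sepl, cs) =>
          if String.ofList [c] ∈ seps then (sbare, sepl, cs ++ [c])
          else (sbare ++ [c], sepl ++ [String.ofList cs.reverse], [])) ([], [], [])) =
      ((l.filter (fun c => !decide (String.ofList [c] ∈ seps))).reverse,
       (pvGB (fun c => decide (String.ofList [c] ∈ seps)) (l.dropWhile (fun c => decide (String.ofList [c] ∈ seps)))).2.reverse,
       (l.takeWhile (fun c => decide (String.ofList [c] ∈ seps))).reverse) := by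
  induction l with
  | nil => simp [pvGB]
  | cons c t ih =>
      by_cases h : String.ofList [c] ∈ seps
      · simp [List.foldr_cons, ih, h]
      · simp [List.foldr_cons, ih, h, pvGB]

theorem unzip_sep_eq (s : String) (seps : List String) :
    unzip_sep s seps =
      (String.ofList (s.toList.filter (fun c => !decide (String.ofList [c] ∈ seps))),
       (pvGB (fun c => decide (String.ofList [c] ∈ seps))
          (s.toList.dropWhile (fun c => decide (String.ofList [c] ∈ seps)))).2.reverse ++
         [String.ofList (s.toList.takeWhile (fun c => decide (String.ofList [c] ∈ seps))).reverse]) := by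
  unfold unzip_sep
  rw [List.foldl_reverse]
  have := pvFoldr_inv seps s.toList
  simp only [this]
  simp

theorem unzip_sep_alt_eq (s : String) (seps : List String) :
    unzip_sep_alt s seps =
      (String.ofList (s.toList.filter (fun c => !decide (String.ofList [c] ∈ seps))),
       (pvGB (fun c => decide (String.ofList [c] ∈ seps))
          (s.toList.dropWhile (fun c => decide (String.ofList [c] ∈ seps)))).2.reverse ++
         [String.ofList (s.toList.takeWhile (fun c => decide (String.ofList [c] ∈ seps)))]) := by
  unfold unzip_sep_alt
  simp [pvGoB_eq _ _ _ _ _ (le_refl _), pvGB_bare]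

-- ===== VERDICT (by name: the statement is the Claim_ definition above) =====
theorem unzip_sep_spec : Claim_unchanged_unzip_sep := by
  intro s seps _ hD
  rw [unzip_sep_eq, unzip_sep_alt_eq]
  unfold D_unzip_sep at hD
  rw [not_ne_iff, pvLeadSeps_eq] at hD
  rw [← hD]

theorem unzip_sep_changed : Claim_changed_unzip_sep := by
  unfold Claim_changed_unzip_sep; decide

theorem unzip_sep_tight : Claim_exact_unzip_sep := by
  intro s seps _ hD h
  rw [unzip_sep_eq, unzip_sep_alt_eq] at h
  have h2 := congrArg (fun q : String × List String => q.2) h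
  simp only [List.append_cancel_left_eq, List.cons.injEq, and_true] at h2
  exact hD (by
    rw [pvLeadSeps_eq]
    exact (by simpa using congrArg String.toList h2 : _ = _).symm)
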